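-- pv_equiv track=rewrite | github.com/SVUCTF/SVUCTF-HELLOWORLD-2024 | challenges/misc/runme_c3/build/encode.py | encrypt_flag
-- ===== SOURCE A (Python) =====
-- def encrypt_char(c, magic):
--     value = ord(c)
--     value = ((value << 4) | (value >> 4)) & 0xFF
--     value ^= magic & 0xFF
--     return value
--
-- def encrypt_flag(flag, magic):
--     encrypted = []
--     for i in range(0, len(flag), 4):
--         chunk = flag[i : i + 4].ljust(4, "\x00")
--         value = 0
--         for j in range(4):
--             value |= encrypt_char(chunk[j], magic) << (8 * j)
--         encrypted.append(value)
--     return encrypted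
-- ===== SOURCE B (Python) =====
-- def encrypt_char(c, magic):
--     value = ord(c)
--     value = ((value << 4) | (value >> 4)) & 0xFF
--     value ^= magic & 0xFF
--     return value
--
-- def encrypt_flag(flag, magic):
--     # pad once up front, encrypt in one flat pass, then group bytes 4 at a time
--     padded = flag + "\x00" * (-len(flag) % 4)
--     it = iter([encrypt_char(c, magic) for c in padded])
--     return [b0 | b1 << 8 | b2 << 16 | b3 << 24 for b0, b1, b2, b3 in zip(it, it, it, it)]
-- ===== Notes on version B (the rewrite author's own statement) =====
-- stated objective: alternative
-- what changed: A walks the string by index in chunks of 4 with an inner shift-accumulate loop over each padded chunk; B pads the whole flag once, encrypts every character in one flat pass into a byte buffer, then packs that buffer four bytes at a time (zip of one iterator) into little-endian words.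
import Mathlib
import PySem

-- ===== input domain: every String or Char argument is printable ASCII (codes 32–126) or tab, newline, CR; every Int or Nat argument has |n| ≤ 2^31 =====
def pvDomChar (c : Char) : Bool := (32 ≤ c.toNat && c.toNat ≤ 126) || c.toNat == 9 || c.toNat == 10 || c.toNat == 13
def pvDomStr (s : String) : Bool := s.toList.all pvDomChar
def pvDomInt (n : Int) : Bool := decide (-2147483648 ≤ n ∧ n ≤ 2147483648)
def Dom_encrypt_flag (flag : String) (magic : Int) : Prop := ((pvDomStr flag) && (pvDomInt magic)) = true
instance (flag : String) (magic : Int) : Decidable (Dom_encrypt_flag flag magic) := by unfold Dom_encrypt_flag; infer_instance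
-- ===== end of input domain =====

-- B packs the padded, encrypted byte buffer four bytes at a time instead of A's indexed chunk loop with an inner shift loop; same O(n) cost, different decomposition.

-- ===== PORT A =====
-- helper from the same module, shared by both Pythons
def encrypt_char (c : Char) (magic : Int) : Int :=
  let value : Int := (c.toNat : Int)                                    -- ord(c)
  let value := PySem.Int.band (PySem.Int.bor (value <<< (4:Nat)) (value >>> (4:Nat))) 0xFF    -- ((value << 4) | (value >> 4)) & 0xFF  (value ≥ 0, so ||| = Python |)
  PySem.Int.bxor value (PySem.Int.band magic 0xFF)                      -- value ^= magic & 0xFF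

-- chunk.ljust(4, "\x00")  (exact: the chunk never has more than 4 chars)
def pvLjust4 (t : List Char) : List Char := t ++ List.replicate (4 - t.length) '\x00'

-- the inner loop: for j in range(4): value |= encrypt_char(chunk[j], magic) << (8 * j)
def pvChunkWord (chunk : List Char) (magic : Int) : Int :=
  (PySem.List.pyRange 0 4 1).foldl
    (fun value j =>
      PySem.Int.bor value ((encrypt_char (PySem.List.pyGetD chunk j '\x00') magic) <<< (8 * j).toNat))
    0

def encrypt_flag (flag : String) (magic : Int) : List Int :=
  let cs := flag.toList
  (PySem.List.pyRange 0 (cs.length : Int) 4).foldl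
    (fun encrypted i =>
      encrypted ++ [pvChunkWord (pvLjust4 (PySem.List.slice cs (some i) (some (i + 4)))) magic])
    []

-- ===== PORT B =====
-- b0 | b1 << 8 | b2 << 16 | b3 << 24
def pvCombine (b0 b1 b2 b3 : Int) : Int :=
  PySem.Int.bor (PySem.Int.bor (PySem.Int.bor b0 (b1 <<< (8:Nat))) (b2 <<< (16:Nat))) (b3 <<< (24:Nat))

-- zip(it, it, it, it): consume the byte buffer four at a time
def pvPack : List Int → List Int
  | b0 :: b1 :: b2 :: b3 :: rest => pvCombine b0 b1 b2 b3 :: pvPack rest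
  | _ => []

def encrypt_flag_alt (flag : String) (magic : Int) : List Int :=
  let padded := flag.toList ++ List.replicate (PySem.Int.mod (-(flag.toList.length : Int)) 4).toNat '\x00'
  pvPack (padded.map (fun c => encrypt_char c magic))

-- ===== PRECONDITION & SPEC =====
def Spec_encrypt_flag (flag : String) (magic : Int) (out : List Int) : Prop := out = encrypt_flag_alt flag magic
instance (flag : String) (magic : Int) (out : List Int) : Decidable (Spec_encrypt_flag flag magic out) := by unfold Spec_encrypt_flag; infer_instance

-- ===== CLAIM (what is proved, stated in full; the proofs are below) =====
def Claim_equal_encrypt_flag : Prop := ∀ (flag : String) (magic : Int), Dom_encrypt_flag flag magic → Spec_encrypt_flag flag magic (encrypt_flag flag magic)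

-- ===== LEMMAS AND PROOFS =====

lemma pvFoldl_snoc (g : Int → Int) : ∀ (l : List Int) (acc : List Int),
    l.foldl (fun a i => a ++ [g i]) acc = acc ++ l.map g := by
  intro l
  induction l with
  | nil => simp
  | cons x xs ih => intro acc; simp [ih]

lemma pvChunkWord_four (t0 t1 t2 t3 : Char) (magic : Int) :
    pvChunkWord [t0, t1, t2, t3] magic
      = pvCombine (encrypt_char t0 magic) (encrypt_char t1 magic)
                  (encrypt_char t2 magic) (encrypt_char t3 magic) := by
  have h : PySem.List.pyRange 0 4 1 = [0, 1, 2, 3] := by decide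
  simp [pvChunkWord, h, pvCombine, PySem.List.pyGetD, PySem.List.pyGet?, PySem.List.pyIdx?,
        PySem.Int.bor_comm]

lemma pvRange04_nat (m : Nat) :
    PySem.List.pyRange 0 (m : Int) 4 = (List.range ((m + 3) / 4)).map (fun k => ((4 * k : Nat) : Int)) := by
  rw [PySem.List.pyRange_of_pos _ _ (by norm_num)]
  rcases Nat.eq_zero_or_pos m with h | h
  · subst h; simp
  · have h1 : (0 : Int) < (m : Int) := by exact_mod_cast h
    rw [if_pos h1]
    have h2 : (((m : Int) - 0 + 4 - 1) / 4).toNat = (m + 3) / 4 := by omega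
    rw [h2]
    apply List.map_congr_left
    intro k _
    push_cast
    ring

lemma pvModShift (n : Int) : PySem.Int.mod (-(n + 4)) 4 = PySem.Int.mod (-n) 4 := by
  rw [PySem.Int.mod_eq_emod_of_pos (by norm_num : (0:Int) < 4), PySem.Int.mod_eq_emod_of_pos (by norm_num : (0:Int) < 4)]
  omega

lemma pvMapForm (magic : Int) : ∀ (m : Nat) (cs : List Char), cs.length = m →
    (List.range ((cs.length + 3) / 4)).map
      (fun k => pvChunkWord (pvLjust4 ((cs.drop (4 * k)).take 4)) magic)
    = pvPack ((cs ++ List.replicate (PySem.Int.mod (-(cs.length : Int)) 4).toNat '\x00').map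
        (fun c => encrypt_char c magic)) := by
  intro m
  induction m using Nat.strong_induction_on with
  | _ m ih =>
    intro cs hm
    match cs with
    | [] => simp [pvPack, PySem.Int.mod]
    | [a] =>
      simp [pvLjust4, pvPack, List.replicate, pvChunkWord_four, List.range_succ]
    | [a, b] =>
      simp [pvLjust4, pvPack, List.replicate, pvChunkWord_four, List.range_succ]
    | [a, b, c] =>
      simp [pvLjust4, pvPack, pvChunkWord_four, List.range_succ]
    | a :: b :: c :: d :: r =>
      have hlen : (a :: b :: c :: d :: r).length = r.length + 4 := by simp
      have hcnt : ((a :: b :: c :: d :: r).length + 3) / 4 = (r.length + 3) / 4 + 1 := by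
        simp only [hlen]; omega
      rw [hcnt, List.range_succ_eq_map]
      have hmod : PySem.Int.mod (-((a :: b :: c :: d :: r).length : Int)) 4
          = PySem.Int.mod (-(r.length : Int)) 4 := by
        have : ((a :: b :: c :: d :: r).length : Int) = (r.length : Int) + 4 := by
          simp [hlen]
        rw [this, pvModShift]
      rw [hmod]
      have htail : ∀ k : Nat,
          ((a :: b :: c :: d :: r).drop (4 * (k + 1))).take 4 = (r.drop (4 * k)).take 4 := by
        intro k
        have h4 : 4 * (k + 1) = (4 * k) + 4 := by ring
        rw [h4]
        have : (a :: b :: c :: d :: r).drop (4 * k + 4) = r.drop (4 * k) := by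
          have : 4 * k + 4 = (((4 * k + 1) + 1) + 1) + 1 := by ring
          rw [this]; simp [List.drop_succ_cons]
        rw [this]
      have hhead : ((a :: b :: c :: d :: r).drop (4 * 0)).take 4 = [a, b, c, d] := by simp
      have hih := ih r.length (by omega) r rfl
      simp only [List.map_cons, List.map_map, List.map_append]
      rw [hhead]
      have : (List.range ((r.length + 3) / 4)).map
            ((fun k => pvChunkWord (pvLjust4 (((a :: b :: c :: d :: r).drop (4 * k)).take 4)) magic) ∘ Nat.succ)
          = (List.range ((r.length + 3) / 4)).map
            (fun k => pvChunkWord (pvLjust4 ((r.drop (4 * k)).take 4)) magic) := by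
        apply List.map_congr_left
        intro k _
        simp only [Function.comp]
        rw [htail k]
      rw [this, hih]
      simp [pvLjust4, pvPack, pvChunkWord_four]

theorem pvMain (magic : Int) (cs : List Char) :
    (PySem.List.pyRange 0 (cs.length : Int) 4).foldl
      (fun encrypted i =>
        encrypted ++ [pvChunkWord (pvLjust4 (PySem.List.slice cs (some i) (some (i + 4)))) magic])
      []
    = pvPack ((cs ++ List.replicate (PySem.Int.mod (-(cs.length : Int)) 4).toNat '\x00').map
        (fun c => encrypt_char c magic)) := by
  rw [pvFoldl_snoc, pvRange04_nat, List.map_map, List.nil_append]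
  have hslice : ∀ k : Nat,
      PySem.List.slice cs (some ((4 * k : Nat) : Int)) (some (((4 * k : Nat) : Int) + 4))
        = (cs.drop (4 * k)).take 4 := by
    intro k
    have h := PySem.List.slice_natCast_add cs (4 * k) 4
    simpa using h
  have : (List.range ((cs.length + 3) / 4)).map
        ((fun i => pvChunkWord (pvLjust4 (PySem.List.slice cs (some i) (some (i + 4)))) magic)
          ∘ fun k : Nat => ((4 * k : Nat) : Int))
      = (List.range ((cs.length + 3) / 4)).map
        (fun k => pvChunkWord (pvLjust4 ((cs.drop (4 * k)).take 4)) magic) := by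
    apply List.map_congr_left
    intro k _
    simp only [Function.comp]
    rw [hslice k]
  rw [this]
  exact pvMapForm magic cs.length cs rfl

-- ===== VERDICT (by name: the statement is the Claim_ definition above) =====
theorem encrypt_flag_spec : Claim_equal_encrypt_flag := by
  intro flag magic _
  unfold Spec_encrypt_flag encrypt_flag encrypt_flag_alt
  exact pvMain magic flag.toList
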